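-- pv_equiv track=rewrite | github.com/bmfrankel-arch/fabric-visualizer-api | scripts/validate_rtg_images.py | prefer_image_item
-- ===== SOURCE A (Python) =====
-- def prefer_image_item(items_with_same_name):
--     """Given multiple entries for the same product, pick the best one.
--     Prefer _image-item over _image-room over _image-3-2.
--     """
--     priority = {"_image-item": 0, "_image-3-2": 1, "_image-room": 2}
--
--     def score(item):
--         url = item.get("image_url", "")
--         for suffix, rank in priority.items():
--             if suffix in url:
--                 return rank
--         return 99
--
--     return min(items_with_same_name, key=score)
-- ===== SOURCE B (Python) =====
-- def prefer_image_item(items_with_same_name):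
--     """Pick the best entry: loop over the priority suffixes in preference
--     order and return the first item whose image_url contains the suffix;
--     if none matches, fall back to the first item."""
--     for suffix in ("_image-item", "_image-3-2", "_image-room"):
--         for item in items_with_same_name:
--             if suffix in item.get("image_url", ""):
--                 return item
--     return items_with_same_name[0]
-- ===== Notes on version B (the rewrite author's own statement) =====
-- stated objective: alternative
-- what changed: Instead of scoring every item and taking min(key=score), B loops over the priority suffixes outermost and returns the first item containing the current suffix, falling back to the first item; it can return early without scanning the whole list.
import Mathlib
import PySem

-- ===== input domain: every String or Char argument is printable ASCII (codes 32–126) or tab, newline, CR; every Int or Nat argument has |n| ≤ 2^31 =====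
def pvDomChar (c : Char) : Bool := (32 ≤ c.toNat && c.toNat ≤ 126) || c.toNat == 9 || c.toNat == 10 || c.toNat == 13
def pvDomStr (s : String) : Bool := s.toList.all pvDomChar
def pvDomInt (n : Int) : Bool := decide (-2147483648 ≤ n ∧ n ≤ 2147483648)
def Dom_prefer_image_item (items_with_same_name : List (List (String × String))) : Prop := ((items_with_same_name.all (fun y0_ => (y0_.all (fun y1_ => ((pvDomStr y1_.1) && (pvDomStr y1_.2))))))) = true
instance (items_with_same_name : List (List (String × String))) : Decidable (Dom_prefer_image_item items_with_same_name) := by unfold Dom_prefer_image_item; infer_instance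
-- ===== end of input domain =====

-- B inverts the traversal: priority suffixes outermost, first matching item returned (first-item fallback),
-- instead of A's score-every-item-and-take-min; return values agree on every nonempty list.


-- shared primitive: item.get("image_url", "") on the association list (first match)
def pvUrl (item : List (String × String)) : String :=
  match item.find? (fun p => p.1 == "image_url") with
  | some p => p.2
  | none => ""

-- ===== PORT A =====
def pvPriority : List (String × Int) := [("_image-item", 0), ("_image-3-2", 1), ("_image-room", 2)]

-- the 'for suffix, rank in priority.items()' loop of score
def pvScoreGo (url : String) : List (String × Int) → Int
  | [] => 99
  | (suffix, rank) :: rest => if PySem.Str.isIn suffix url then rank else pvScoreGo url rest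

def pvScore (item : List (String × String)) : Int := pvScoreGo (pvUrl item) pvPriority

def prefer_image_item (items_with_same_name : List (List (String × String))) : List (String × String) :=
  (PySem.List.min? items_with_same_name pvScore).getD []

-- ===== PORT B =====
-- inner loop: first item whose image_url contains the suffix
def pvScan (suffix : String) : List (List (String × String)) → Option (List (String × String))
  | [] => none
  | item :: rest => if PySem.Str.isIn suffix (pvUrl item) then some item else pvScan suffix rest

-- outer loop over the priority suffixes
def pvCascade (items : List (List (String × String))) : List String → Option (List (String × String))
  | [] => none
  | suf :: sufs =>
    match pvScan suf items with
    | some it => some it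
    | none => pvCascade items sufs

def prefer_image_item_alt (items_with_same_name : List (List (String × String))) : List (String × String) :=
  match pvCascade items_with_same_name ["_image-item", "_image-3-2", "_image-room"] with
  | some it => it
  | none => items_with_same_name.headD []

-- ===== PRECONDITION & SPEC =====
-- Pre_ excludes only the empty list, on which A's min() raises ValueError.
def Pre_prefer_image_item (items_with_same_name : List (List (String × String))) : Prop :=
  items_with_same_name ≠ []
instance (items_with_same_name : List (List (String × String))) : Decidable (Pre_prefer_image_item items_with_same_name) := by unfold Pre_prefer_image_item; infer_instance

def pvWitness_prefer_image_item : (List (List (String × String))) := [[("image_url", "a_image-item.png")]]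

def Spec_prefer_image_item (items_with_same_name : List (List (String × String))) (out : List (String × String)) : Prop := out = prefer_image_item_alt items_with_same_name
instance (items_with_same_name : List (List (String × String))) (out : List (String × String)) : Decidable (Spec_prefer_image_item items_with_same_name out) := by unfold Spec_prefer_image_item; infer_instance

-- ===== CLAIM (what is proved, stated in full; the proofs are below) =====
def Claim_equal_prefer_image_item : Prop := ∀ (items_with_same_name : List (List (String × String))), Dom_prefer_image_item items_with_same_name → Pre_prefer_image_item items_with_same_name → Spec_prefer_image_item items_with_same_name (prefer_image_item items_with_same_name)

-- ===== LEMMAS AND PROOFS =====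

-- A's score, written as the nested if over the three suffix tests
lemma pvScore_eq (item : List (String × String)) :
    pvScore item =
      if PySem.Str.isIn "_image-item" (pvUrl item) then 0
      else if PySem.Str.isIn "_image-3-2" (pvUrl item) then 1
      else if PySem.Str.isIn "_image-room" (pvUrl item) then 2
      else 99 := rfl

-- B applied to a nonempty list, with the head as explicit fallback
def pvB (a : List (String × String)) (rest : List (List (String × String))) : List (String × String) :=
  match pvCascade (a :: rest) ["_image-item", "_image-3-2", "_image-room"] with
  | some it => it
  | none => a

lemma pvB_singleton (a : List (String × String)) : pvB a [] = a := by
  simp only [pvB, pvCascade, pvScan]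
  split_ifs <;> rfl

-- folding A's min-accumulator step over one more element commutes with B's cascade
set_option maxHeartbeats 4000000 in
lemma pvB_step (a x : List (String × String)) (rest : List (List (String × String))) :
    pvB (if pvScore x < pvScore a then x else a) rest = pvB a (x :: rest) := by
  by_cases h : pvScore x < pvScore a <;>
    [rw [if_pos h]; rw [if_neg h]] <;>
    rw [pvScore_eq x, pvScore_eq a] at h <;>
    simp only [pvB, pvCascade, pvScan] <;>
    cases ha0 : PySem.Str.isIn "_image-item" (pvUrl a) <;>
    cases hx0 : PySem.Str.isIn "_image-item" (pvUrl x) <;>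
    cases ha1 : PySem.Str.isIn "_image-3-2" (pvUrl a) <;>
    cases hx1 : PySem.Str.isIn "_image-3-2" (pvUrl x) <;>
    cases ha2 : PySem.Str.isIn "_image-room" (pvUrl a) <;>
    cases hx2 : PySem.Str.isIn "_image-room" (pvUrl x) <;>
    simp only [ha0, hx0, ha1, hx1, ha2, hx2, reduceIte] at h ⊢
  all_goals try (exfalso; revert h; decide)
  all_goals
    cases hr0 : pvScan "_image-item" rest <;>
    cases hr1 : pvScan "_image-3-2" rest <;>
    cases hr2 : pvScan "_image-room" rest <;>
    rfl

-- one step of A's min()-fold absorbs the better of the first two elements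
lemma pvMin_cons_cons (a x : List (String × String)) (rest : List (List (String × String))) :
    PySem.List.min? (a :: x :: rest) pvScore
      = PySem.List.min? ((if pvScore x < pvScore a then x else a) :: rest) pvScore := by
  by_cases h : pvScore x < pvScore a <;> simp [PySem.List.min?, List.foldl, h]

-- A's min?-fold computes B on a :: rest
lemma pvFold_eq (rest : List (List (String × String))) :
    ∀ a, PySem.List.min? (a :: rest) pvScore = some (pvB a rest) := by
  induction rest with
  | nil => intro a; simp [PySem.List.min?, List.foldl, pvB_singleton]
  | cons x rest ih =>
    intro a
    rw [pvMin_cons_cons, ih, pvB_step]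

-- ===== VERDICT (by name: the statement is the Claim_ definition above) =====
theorem prefer_image_item_spec : Claim_equal_prefer_image_item := by
  intro items _hdom hpre
  unfold Spec_prefer_image_item
  cases items with
  | nil => exact absurd rfl hpre
  | cons a rest =>
    have h : PySem.List.min? (a :: rest) pvScore = some (pvB a rest) := pvFold_eq rest a
    show (PySem.List.min? (a :: rest) pvScore).getD [] = prefer_image_item_alt (a :: rest)
    rw [h]
    cases hc : pvCascade (a :: rest) ["_image-item", "_image-3-2", "_image-room"] <;>
      simp [pvB, prefer_image_item_alt, hc]
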